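-- pv_equiv track=rewrite | github.com/paiml/depyler | examples/hard_final_ml_crossval.py | threshold_train
-- ===== SOURCE A (Python) =====
-- def threshold_train(features: list[int], labels: list[int]) -> int:
--     """Simple threshold classifier: find threshold that minimizes error."""
--     best_t: int = 0
--     best_err: int = len(features) + 1
--     t: int = 0
--     while t <= 10:
--         err: int = 0
--         i: int = 0
--         while i < len(features):
--             fv: int = features[i]
--             lv: int = labels[i]
--             pred: int = 0
--             if fv >= t:
--                 pred = 1
--             if pred != lv:
--                 err = err + 1
--             i = i + 1
--         if err < best_err:
--             best_err = err
--             best_t = t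
--         t = t + 1
--     return best_t
-- ===== SOURCE B (Python) =====
-- def threshold_train(features: list[int], labels: list[int]) -> int:
--     """One aggregation pass, then an O(1)-per-threshold sweep.
--
--     err(t) = err(0) + sum of delta[v] for v < t, where delta[v] is the net
--     error change when the threshold moves past feature value v.
--     """
--     n = len(features)
--     err0 = 0
--     delta = [0] * 10
--     for i in range(n):
--         fv = features[i]
--         lv = labels[i]
--         if fv >= 0:
--             if lv != 1:
--                 err0 = err0 + 1
--         else:
--             if lv != 0:
--                 err0 = err0 + 1
--         if 0 <= fv <= 9:
--             delta[fv] = delta[fv] + (1 if lv != 0 else 0) - (1 if lv != 1 else 0)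
--     best_t = 0
--     best_err = n + 1
--     err = err0
--     if err < best_err:
--         best_err = err
--         best_t = 0
--     for t in range(1, 11):
--         err = err + delta[t - 1]
--         if err < best_err:
--             best_err = err
--             best_t = t
--     return best_t
-- ===== Notes on version B (the rewrite author's own statement) =====
-- stated objective: faster
-- what changed: B replaces A's 11 independent scans of the data (one per candidate threshold) with a single aggregation pass computing the t=0 error plus a 10-entry per-value error-delta array, then sweeps the 11 thresholds in O(1) each with a running error.
import Mathlib
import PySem

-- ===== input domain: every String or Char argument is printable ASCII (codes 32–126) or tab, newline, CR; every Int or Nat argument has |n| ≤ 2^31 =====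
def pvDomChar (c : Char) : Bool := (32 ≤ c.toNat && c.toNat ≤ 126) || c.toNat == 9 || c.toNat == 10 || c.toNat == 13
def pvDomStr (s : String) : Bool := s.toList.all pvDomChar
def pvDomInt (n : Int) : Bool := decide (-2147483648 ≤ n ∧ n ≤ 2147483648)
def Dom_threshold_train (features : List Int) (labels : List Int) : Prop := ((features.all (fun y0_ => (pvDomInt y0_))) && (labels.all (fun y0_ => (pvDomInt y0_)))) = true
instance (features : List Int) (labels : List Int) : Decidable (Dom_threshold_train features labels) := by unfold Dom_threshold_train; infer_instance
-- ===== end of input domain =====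

-- B replaces A's 11 full scans of the data by one aggregation pass (err at t=0 plus a
-- per-value error delta array) followed by an O(1)-per-threshold sweep; same return value.

-- ===== PORT A =====
-- inner `while i < len(features)` loop of A, counting errors at threshold t
def threshold_train_err (features : List Int) (labels : List Int) (t : Nat) : Int :=
  (List.range features.length).foldl (fun (err : Int) (i : Nat) =>
    let fv := (PySem.List.pyGet? features (i : Int)).getD 0
    let lv := (PySem.List.pyGet? labels (i : Int)).getD 0
    let pred : Int := if fv ≥ (t : Int) then 1 else 0
    if pred ≠ lv then err + 1 else err) 0

def threshold_train (features : List Int) (labels : List Int) : Int :=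
  -- `while t <= 10` ported as a fold over t = 0,…,10
  ((List.range 11).foldl (fun (st : Int × Int) (t : Nat) =>
      let err := threshold_train_err features labels t
      if err < st.2 then ((t : Int), err) else st)
    ((0 : Int), (features.length : Int) + 1)).1

-- ===== PORT B =====
-- B's single data pass: returns (err at t = 0, delta array of length 10)
def threshold_train_alt_scan (features : List Int) (labels : List Int) : Int × List Int :=
  (List.range features.length).foldl (fun (p : Int × List Int) (i : Nat) =>
    let fv := (PySem.List.pyGet? features (i : Int)).getD 0
    let lv := (PySem.List.pyGet? labels (i : Int)).getD 0
    ((if 0 ≤ fv then (if lv ≠ 1 then p.1 + 1 else p.1) else (if lv ≠ 0 then p.1 + 1 else p.1)),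
     (if 0 ≤ fv ∧ fv ≤ 9 then
        p.2.set fv.toNat (p.2.getD fv.toNat 0 +
          ((if lv ≠ 0 then (1 : Int) else 0) - (if lv ≠ 1 then (1 : Int) else 0)))
      else p.2)))
    ((0 : Int), List.replicate 10 (0 : Int))

def threshold_train_alt (features : List Int) (labels : List Int) : Int :=
  let n : Int := (features.length : Int)
  let acc := threshold_train_alt_scan features labels
  -- t = 0 handled before the sweep, exactly as in Source B
  let st0 : Int × Int := if acc.1 < n + 1 then ((0 : Int), acc.1) else ((0 : Int), n + 1)
  -- `for t in range(1, 11)` ported as a fold over t = 1,…,10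
  ((List.range' 1 10).foldl (fun (p : (Int × Int) × Int) (t : Nat) =>
      let err := p.2 + acc.2.getD (t - 1) 0
      ((if err < p.1.2 then ((t : Int), err) else p.1), err))
    (st0, acc.1)).1.1

-- ===== PRECONDITION & SPEC =====
-- A raises IndexError (labels[i]) when labels is shorter than features; B raises there too.
def Pre_threshold_train (features : List Int) (labels : List Int) : Prop :=
  features.length ≤ labels.length
instance (features : List Int) (labels : List Int) : Decidable (Pre_threshold_train features labels) := by
  unfold Pre_threshold_train; infer_instance

def pvWitness_threshold_train : List Int × List Int := ([1, 5, 3], [0, 1, 1])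

def Spec_threshold_train (features : List Int) (labels : List Int) (out : Int) : Prop := out = threshold_train_alt features labels
instance (features : List Int) (labels : List Int) (out : Int) : Decidable (Spec_threshold_train features labels out) := by unfold Spec_threshold_train; infer_instance

-- ===== CLAIM (what is proved, stated in full; the proofs are below) =====
def Claim_equal_threshold_train : Prop := ∀ (features : List Int) (labels : List Int), Dom_threshold_train features labels → Pre_threshold_train features labels → Spec_threshold_train features labels (threshold_train features labels)

-- ===== LEMMAS AND PROOFS =====

-- per-index accessors (both ports read features[i]/labels[i] the same way)
def pvF (features : List Int) (i : Nat) : Int := (PySem.List.pyGet? features (i : Int)).getD 0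
def pvL (labels : List Int) (i : Nat) : Int := (PySem.List.pyGet? labels (i : Int)).getD 0

-- per-point error indicator at threshold t
def pvC (F L : Nat → Int) (t : Int) (i : Nat) : Int :=
  if (if F i ≥ t then (1 : Int) else 0) ≠ L i then 1 else 0

-- per-point error delta when the threshold moves past F i
def pvW (L : Nat → Int) (i : Nat) : Int :=
  (if L i ≠ 0 then (1 : Int) else 0) - (if L i ≠ 1 then (1 : Int) else 0)

lemma foldl_count (C : Nat → Prop) [DecidablePred C] :
    ∀ (l : List Nat) (a : Int),
      l.foldl (fun err i => if C i then err + 1 else err) a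
        = a + (l.map (fun i => if C i then (1 : Int) else 0)).sum := by
  intro l
  induction l with
  | nil => intro a; simp
  | cons x xs ih =>
      intro a
      simp only [List.foldl_cons, List.map_cons, List.sum_cons, ih]
      by_cases h : C x <;> simp [h] <;> ring

def pvEstep (features labels : List Int) (t : Nat) (err : Int) (i : Nat) : Int :=
  if (if pvF features i ≥ (t : Int) then (1 : Int) else 0) ≠ pvL labels i then err + 1 else err

def pvScanE (features labels : List Int) (e : Int) (i : Nat) : Int :=
  if 0 ≤ pvF features i then (if pvL labels i ≠ 1 then e + 1 else e)
  else (if pvL labels i ≠ 0 then e + 1 else e)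

def pvScanD (features labels : List Int) (d : List Int) (i : Nat) : List Int :=
  if 0 ≤ pvF features i ∧ pvF features i ≤ 9 then
    d.set (pvF features i).toNat (d.getD (pvF features i).toNat 0 + pvW (pvL labels) i)
  else d

lemma err_def (features labels : List Int) (t : Nat) :
    threshold_train_err features labels t
      = (List.range features.length).foldl (pvEstep features labels t) 0 := rfl

lemma scan_def (features labels : List Int) :
    threshold_train_alt_scan features labels
      = (List.range features.length).foldl
          (fun (p : Int × List Int) i => (pvScanE features labels p.1 i, pvScanD features labels p.2 i))
          ((0 : Int), List.replicate 10 (0 : Int)) := rfl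

lemma err_eq_sum (features labels : List Int) (t : Nat) :
    threshold_train_err features labels t
      = ((List.range features.length).map (pvC (pvF features) (pvL labels) (t : Int))).sum := by
  rw [err_def]
  have h := foldl_count
      (fun i => (if pvF features i ≥ (t : Int) then (1 : Int) else 0) ≠ pvL labels i)
      (List.range features.length) 0
  rw [zero_add] at h
  exact h

lemma foldl_pair {α β γ : Type} (f : β → α → β) (g : γ → α → γ) :
    ∀ (l : List α) (a : β) (b : γ),
      l.foldl (fun (p : β × γ) i => (f p.1 i, g p.2 i)) (a, b) = (l.foldl f a, l.foldl g b) := by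
  intro l
  induction l with
  | nil => intro a b; simp
  | cons x xs ih => intro a b; simp [ih]

-- the scan's first component is the error count at t = 0
lemma scan_fst (features labels : List Int) :
    (threshold_train_alt_scan features labels).1 = threshold_train_err features labels 0 := by
  rw [scan_def, foldl_pair (pvScanE features labels) (pvScanD features labels), err_def]
  simp only
  have hfun : pvScanE features labels = pvEstep features labels 0 := by
    funext e i
    unfold pvScanE pvEstep
    push_cast
    split_ifs <;> omega
  rw [hfun]

-- the scan's second component aggregates the per-value deltas
lemma scan_snd (features labels : List Int) :
    ((threshold_train_alt_scan features labels).2.length = 10) ∧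
    (∀ t : Nat, t < 10 →
      (threshold_train_alt_scan features labels).2.getD t 0
        = ((List.range features.length).map
            (fun i => if pvF features i = (t : Int) then pvW (pvL labels) i else 0)).sum) := by
  rw [scan_def, foldl_pair (pvScanE features labels) (pvScanD features labels)]
  simp only
  induction features.length with
  | zero =>
      refine ⟨rfl, fun t ht => ?_⟩
      show (List.replicate 10 (0 : Int)).getD t 0 = 0
      rw [List.getD_eq_getElem?_getD, List.getElem?_replicate]
      split <;> rfl
  | succ n ih =>
      obtain ⟨ihl, ihg⟩ := ih
      rw [List.range_succ, List.foldl_append, List.foldl_cons, List.foldl_nil]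
      set d := (List.range n).foldl (pvScanD features labels) (List.replicate 10 (0 : Int)) with hd
      by_cases h : 0 ≤ pvF features n ∧ pvF features n ≤ 9
      · constructor
        · simp [pvScanD, h, ihl]
        · intro t ht
          rw [List.map_append, List.sum_append]
          simp only [List.map_cons, List.map_nil, List.sum_cons, List.sum_nil]
          unfold pvScanD
          rw [if_pos h]
          by_cases he : (pvF features n).toNat = t
          · have hFt : pvF features n = (t : Int) := by omega
            rw [he, hFt, List.getD_eq_getElem?_getD, List.getElem?_set_self (by omega),
                Option.getD_some, ihg t ht]
            simp
          · have hFt : pvF features n ≠ (t : Int) := by omega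
            rw [List.getD_eq_getElem?_getD, List.getElem?_set_ne he, ← List.getD_eq_getElem?_getD,
                ihg t ht]
            simp [hFt]
      · constructor
        · simp [pvScanD, h, ihl]
        · intro t ht
          have hFt : pvF features n ≠ (t : Int) := by omega
          rw [List.map_append, List.sum_append]
          unfold pvScanD
          rw [if_neg h, ihg t ht]
          simp [hFt]

lemma sum_map_add {l : List Nat} (f g : Nat → Int) :
    (l.map (fun i => f i + g i)).sum = (l.map f).sum + (l.map g).sum := by
  induction l with
  | nil => simp
  | cons x xs ih => simp [ih]; ring

-- moving the threshold from t to t+1 changes the error by the sum of the deltas at value t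
lemma err_succ (features labels : List Int) (t : Nat) :
    threshold_train_err features labels (t + 1)
      = threshold_train_err features labels t
        + ((List.range features.length).map
            (fun i => if pvF features i = (t : Int) then pvW (pvL labels) i else 0)).sum := by
  rw [err_eq_sum, err_eq_sum]
  rw [← sum_map_add]
  refine congrArg _ (List.map_congr_left (fun i _ => ?_))
  unfold pvC pvW
  push_cast
  rcases lt_trichotomy (pvF features i) (t : Int) with h | h | h
  · have h1 : ¬ pvF features i ≥ (t : Int) + 1 := by omega
    have h2 : ¬ pvF features i ≥ (t : Int) := by omega
    have h3 : pvF features i ≠ (t : Int) := by omega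
    simp [h1, h2, h3]
  · have h1 : ¬ pvF features i ≥ (t : Int) + 1 := by omega
    have h2 : pvF features i ≥ (t : Int) := by omega
    simp only [h1, if_false, h2, if_true, h, if_pos rfl]
    by_cases a0 : pvL labels i = 0 <;> by_cases a1 : pvL labels i = 1 <;>
      simp [a0, a1] <;> omega
  · have h1 : pvF features i ≥ (t : Int) + 1 := by omega
    have h2 : pvF features i ≥ (t : Int) := by omega
    have h3 : pvF features i ≠ (t : Int) := by omega
    simp [h1, h2, h3]

-- generic sweep equivalence: running-error fold = recompute-error fold
lemma sweep (E D : Nat → Int) (hD : ∀ t, t < 10 → D t = E (t + 1) - E t) :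
    ∀ (k s : Nat), 1 ≤ s → s + k ≤ 11 → ∀ (st : Int × Int),
      ((List.range' s k).foldl (fun (p : (Int × Int) × Int) (t : Nat) =>
          ((if p.2 + D (t - 1) < p.1.2 then ((t : Int), p.2 + D (t - 1)) else p.1),
           p.2 + D (t - 1))) (st, E (s - 1))).1
        = (List.range' s k).foldl (fun st t => if E t < st.2 then ((t : Int), E t) else st) st := by
  intro k
  induction k with
  | zero => intro s _ _ st; simp
  | succ k ih =>
      intro s hs hk st
      have hstep : E (s - 1) + D (s - 1) = E s := by
        rw [hD (s - 1) (by omega)]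
        have : s - 1 + 1 = s := by omega
        rw [this]; ring
      simp only [List.range'_succ, List.foldl_cons, hstep]
      have hs' : E ((s + 1) - 1) = E s := by norm_num
      rw [show (s + 1) - 1 = s from rfl] at hs'
      by_cases h : E s < st.2
      · simp only [h, if_pos h]
        have := ih (s + 1) (by omega) (by omega) ((s : Int), E s)
        rw [show (s + 1) - 1 = s from rfl] at this
        exact this
      · simp only [h, if_neg h]
        have := ih (s + 1) (by omega) (by omega) st
        rw [show (s + 1) - 1 = s from rfl] at this
        exact this

-- ===== VERDICT (by name: the statement is the Claim_ definition above) =====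
theorem threshold_train_spec : Claim_equal_threshold_train := by
  intro features labels _ _
  unfold Spec_threshold_train
  have hfst := scan_fst features labels
  obtain ⟨hlen, hget⟩ := scan_snd features labels
  have hD : ∀ t, t < 10 →
      (threshold_train_alt_scan features labels).2.getD t 0
        = threshold_train_err features labels (t + 1) - threshold_train_err features labels t := by
    intro t ht
    rw [hget t ht, err_succ features labels t]; ring
  rw [threshold_train, threshold_train_alt]
  simp only
  rw [show List.range 11 = 0 :: List.range' 1 10 by rfl]
  rw [List.foldl_cons]
  have h0 := sweep (fun t => threshold_train_err features labels t)
      (fun t => (threshold_train_alt_scan features labels).2.getD t 0) hD 10 1 (by omega) (by omega)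
      (if threshold_train_err features labels 0 < (features.length : Int) + 1
        then ((0 : Int), threshold_train_err features labels 0)
        else ((0 : Int), (features.length : Int) + 1))
  simp only at h0
  rw [hfst]
  rw [show (1 : Nat) - 1 = 0 from rfl] at h0
  rw [h0]
  by_cases h : threshold_train_err features labels 0 < (features.length : Int) + 1 <;> simp [h]
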